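-- pv_equiv track=rewrite | github.com/igfox/contextual_motifs | lib/glucose_processing.py | hyper_event_num
-- ===== SOURCE A (Python) =====
-- HYPER=180
--
-- def hyper_event_num(arr):
--     '''
--     Returns number of hyperglycemic events in an array
--     '''
--     hyper = 0
--     ht = 0
--     max_ht = 0
--     for i in arr:
--         if i > HYPER:
--             ht += 1
--         else:
--             ht = 0
--         if ht == 4:
--             hyper += 1
--         if ht > max_ht:
--             max_ht = ht
--     return hyper
-- ===== SOURCE B (Python) =====
-- from itertools import groupby
--
-- HYPER = 180
--
-- def hyper_event_num(arr):
--     '''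
--     Returns number of hyperglycemic events in an array
--     '''
--     return sum(1 for k, g in groupby(arr, key=lambda x: x > HYPER)
--                if k and sum(1 for _ in g) >= 4)
-- ===== Notes on version B (the rewrite author's own statement) =====
-- stated objective: idiomatic
-- what changed: Replaced the hand-maintained running-streak counters (and the unused max_ht tracking) by an itertools.groupby segmentation into maximal runs, counting runs above the threshold of length >= 4.
import Mathlib
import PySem

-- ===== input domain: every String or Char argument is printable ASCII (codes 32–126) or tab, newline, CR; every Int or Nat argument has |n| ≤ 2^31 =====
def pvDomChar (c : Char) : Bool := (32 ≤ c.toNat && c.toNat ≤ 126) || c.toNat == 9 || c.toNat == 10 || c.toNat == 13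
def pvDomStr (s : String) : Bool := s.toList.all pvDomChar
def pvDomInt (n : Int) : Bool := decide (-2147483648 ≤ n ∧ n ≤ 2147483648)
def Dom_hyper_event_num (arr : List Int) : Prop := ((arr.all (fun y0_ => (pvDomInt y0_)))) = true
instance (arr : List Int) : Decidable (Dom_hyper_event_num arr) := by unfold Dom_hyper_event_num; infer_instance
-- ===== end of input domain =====

-- B replaces the hand-maintained streak counters (and unused max_ht) by a groupby-style
-- segmentation into maximal runs, counting runs above threshold of length >= 4 (idiomatic).


-- ===== PORT A =====
-- literal port of A: fold over arr with state (hyper, ht, max_ht)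
def hyper_event_num (arr : List Int) : Int :=
  (arr.foldl (fun (st : Int × Int × Int) i =>
      let ht := if i > 180 then st.2.1 + 1 else 0
      let hyper := if ht = 4 then st.1 + 1 else st.1
      let max_ht := if ht > st.2.2 then ht else st.2.2
      (hyper, ht, max_ht)) (0, 0, 0)).1

-- ===== PORT B =====
-- port of B: segment arr into maximal runs of equal key (x > 180), count runs with
-- key true and length >= 4 (groupby consumes each group before the next)
def hyper_event_num_alt (arr : List Int) : Int :=
  match arr with
  | [] => 0
  | x :: t =>
    let k := decide (x > 180)
    let run := t.takeWhile (fun y => decide (y > 180) == k)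
    let rest := t.dropWhile (fun y => decide (y > 180) == k)
    (if k = true ∧ 1 + run.length ≥ 4 then 1 else 0) + hyper_event_num_alt rest
termination_by arr.length
decreasing_by
  exact Nat.lt_succ_of_le (List.length_dropWhile_le _ t)

-- ===== PRECONDITION & SPEC =====
def Spec_hyper_event_num (arr : List Int) (out : Int) : Prop := out = hyper_event_num_alt arr
instance (arr : List Int) (out : Int) : Decidable (Spec_hyper_event_num arr out) := by unfold Spec_hyper_event_num; infer_instance

-- ===== CLAIM (what is proved, stated in full; the proofs are below) =====
def Claim_equal_hyper_event_num : Prop := ∀ (arr : List Int), Dom_hyper_event_num arr → Spec_hyper_event_num arr (hyper_event_num arr)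

-- ===== LEMMAS AND PROOFS =====

-- reference count: number of times the streak counter hits exactly 4, starting from streak ht
def pvG (ht : Int) : List Int → Int
  | [] => 0
  | i :: r => if i > 180 then (if ht + 1 = 4 then 1 else 0) + pvG (ht + 1) r else pvG 0 r

theorem pvA_eq_pvG (arr : List Int) : ∀ (hyper ht mx : Int),
    (arr.foldl (fun (st : Int × Int × Int) i =>
      let ht := if i > 180 then st.2.1 + 1 else 0
      let hyper := if ht = 4 then st.1 + 1 else st.1
      let max_ht := if ht > st.2.2 then ht else st.2.2
      (hyper, ht, max_ht)) (hyper, ht, mx)).1 = hyper + pvG ht arr := by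
  induction arr with
  | nil => intro hyper ht mx; simp [pvG]
  | cons i r ih =>
    intro hyper ht mx
    simp only [List.foldl_cons, pvG]
    by_cases h : i > 180 <;> simp [h, ih] <;> (split_ifs <;> ring)

theorem pvG_run (t : List Int) : ∀ ht : Int, 0 ≤ ht →
    pvG ht t = (if ht < 4 ∧ ht + (t.takeWhile (fun y => decide (y > 180))).length ≥ 4 then 1 else 0)
      + pvG 0 (t.dropWhile (fun y => decide (y > 180))) := by
  induction t with
  | nil => intro ht _; simp [pvG]
  | cons i r ih =>
    intro ht hht
    by_cases h : i > 180
    · simp only [pvG, List.takeWhile_cons, List.dropWhile_cons, h, decide_true, if_true,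
        List.length_cons]
      rw [ih (ht + 1) (by omega)]
      split_ifs <;> omega
    · simp only [pvG, List.takeWhile_cons, List.dropWhile_cons, h, decide_false, if_false]
      have : ¬ (ht < 4 ∧ ht + (0 : Int) ≥ 4) := by omega
      simp [this, pvG, h]

theorem pvG_skip_false (t : List Int) :
    pvG 0 (t.dropWhile (fun y => decide (y > 180) == false)) = pvG 0 t := by
  induction t with
  | nil => rfl
  | cons i r ih =>
    by_cases h : i > 180
    · simp [List.dropWhile_cons, h]
    · simp only [List.dropWhile_cons, h, decide_false]
      simpa [pvG, h] using ih

theorem pvAlt_eq_pvG_aux (n : Nat) : ∀ (arr : List Int), arr.length ≤ n →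
    hyper_event_num_alt arr = pvG 0 arr := by
  induction n with
  | zero =>
    intro arr h
    have : arr = [] := by cases arr <;> simp_all
    subst this; rw [hyper_event_num_alt]; rfl
  | succ n ih =>
    intro arr hlen
    match arr with
    | [] => rw [hyper_event_num_alt]; rfl
    | x :: t =>
      rw [hyper_event_num_alt]
      have hrest : (t.dropWhile (fun y => decide (y > 180) == decide (x > 180))).length ≤ n := by
        have := List.length_dropWhile_le (fun y => decide (y > 180) == decide (x > 180)) t
        simp at hlen; omega
      rw [ih _ hrest]
      by_cases h : x > 180
      · have hk : decide (x > 180) = true := by simp [h]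
        have hfun : (fun y => decide (y > 180) == decide (x > 180))
            = (fun y : Int => decide (y > 180)) := by
          funext y; rw [hk]; simp
        rw [hfun]
        conv_rhs => rw [pvG]
        rw [if_pos h, show (0:Int)+1 = 1 from by norm_num, pvG_run t 1 (by omega)]
        simp only [hk, true_and]
        simp only [show ((1:Int) < 4 ∧ 1 + ((t.takeWhile (fun y : Int => decide (y > 180))).length : Int) ≥ 4
              ↔ 1 + (t.takeWhile (fun y : Int => decide (y > 180))).length ≥ 4) from by omega]
        norm_num
      · have hk : decide (x > 180) = false := by simp [h]
        simp only [hk]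
        rw [pvG_skip_false]
        conv_rhs => rw [pvG]
        rw [if_neg h]
        simp

-- ===== VERDICT (by name: the statement is the Claim_ definition above) =====
theorem hyper_event_num_spec : Claim_equal_hyper_event_num := by
  intro arr _
  unfold Spec_hyper_event_num hyper_event_num
  rw [pvA_eq_pvG, pvAlt_eq_pvG_aux arr.length arr (le_refl _)]
  simp
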